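-- pv_equiv track=rewrite | github.com/pawatpanu/pytrade | core/symbol_manager.py | normalize_symbol_name
-- ===== SOURCE A (Python) =====
-- def normalize_symbol_name(symbol: str, available_symbols: list[str]) -> str | None:
--     """Match generic symbol names to broker-specific variants (e.g., BTCUSDm, BTCUSD.a)."""
--     target = symbol.upper()
--     normalized_map = {s.upper(): s for s in available_symbols}
--
--     if target in normalized_map:
--         return normalized_map[target]
--
--     candidates = [s for s in available_symbols if s.upper().startswith(target)]
--     if not candidates:
--         return None
--
--     # Prefer shortest suffix match first.
--     candidates = sorted(candidates, key=lambda s: (len(s), s))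
--     return candidates[0]
-- ===== SOURCE B (Python) =====
-- def normalize_symbol_name(symbol: str, available_symbols: list[str]) -> str | None:
--     """Single pass: track last exact match and the (len, s)-minimal prefix match."""
--     target = symbol.upper()
--     best_exact = None
--     best_prefix = None
--     for s in available_symbols:
--         u = s.upper()
--         if u == target:
--             best_exact = s
--         if u.startswith(target):
--             if best_prefix is None or (len(s), s) < (len(best_prefix), best_prefix):
--                 best_prefix = s
--     return best_exact if best_exact is not None else best_prefix
-- ===== Notes on version B (the rewrite author's own statement) =====
-- stated objective: alternative
-- what changed: Replaces A's build-uppercase-dict / membership lookup / filter / sort pipeline with a single fold over available_symbols that keeps the last exact match and the running (len(s), s)-minimum among prefix matches, dropping the dict and the sort.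
import Mathlib
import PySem

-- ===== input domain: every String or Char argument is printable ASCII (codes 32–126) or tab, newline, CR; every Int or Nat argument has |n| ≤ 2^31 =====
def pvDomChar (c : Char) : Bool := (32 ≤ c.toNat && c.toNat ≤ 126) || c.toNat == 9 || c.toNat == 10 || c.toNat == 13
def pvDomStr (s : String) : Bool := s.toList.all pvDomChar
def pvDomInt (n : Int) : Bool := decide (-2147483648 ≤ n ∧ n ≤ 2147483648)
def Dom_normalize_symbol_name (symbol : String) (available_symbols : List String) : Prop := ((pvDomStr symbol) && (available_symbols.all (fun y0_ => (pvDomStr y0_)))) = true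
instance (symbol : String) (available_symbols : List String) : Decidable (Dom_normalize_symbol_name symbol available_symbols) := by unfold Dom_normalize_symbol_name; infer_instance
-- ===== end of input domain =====

-- B replaces A's build-dict / filter / sort pipeline by one fold keeping the last exact match
-- and the (len, s)-minimal prefix match (objective: alternative decomposition, one pass, no sort).

-- ===== PORT A =====
def normalize_symbol_name (symbol : String) (available_symbols : List String) : Option String :=
  let target := PySem.Str.upper symbol
  let normalized_map : PySem.Dict String String :=
    available_symbols.foldl (fun d s => d.insert (PySem.Str.upper s) s) PySem.Dict.empty
  match normalized_map.get? target with
  | some v => some v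
  | none =>
    let candidates := available_symbols.filter (fun s => PySem.Str.startswith (PySem.Str.upper s) target)
    if candidates = [] then none
    else (PySem.List.sorted2 candidates (fun s => PySem.Str.len s) (fun s => s)).head?

-- ===== PORT B =====
-- Python tuple comparison (len(s), s) < (len(b), b)
def pvKeyLt (s b : String) : Bool :=
  decide (PySem.Str.len s < PySem.Str.len b) ||
    (PySem.Str.len s == PySem.Str.len b && decide (s < b))

def normalize_symbol_name_alt (symbol : String) (available_symbols : List String) : Option String :=
  let target := PySem.Str.upper symbol
  let res := available_symbols.foldl
    (fun (acc : Option String × Option String) s =>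
      (if PySem.Str.upper s == target then some s else acc.1,
       if PySem.Str.startswith (PySem.Str.upper s) target then
         (match acc.2 with
          | none => some s
          | some b => if pvKeyLt s b then some s else some b)
       else acc.2))
    (none, none)
  match res.1 with
  | some v => some v
  | none => res.2

-- ===== PRECONDITION & SPEC =====
def Spec_normalize_symbol_name (symbol : String) (available_symbols : List String) (out : Option String) : Prop := out = normalize_symbol_name_alt symbol available_symbols
instance (symbol : String) (available_symbols : List String) (out : Option String) : Decidable (Spec_normalize_symbol_name symbol available_symbols out) := by unfold Spec_normalize_symbol_name; infer_instance

-- ===== CLAIM (what is proved, stated in full; the proofs are below) =====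
def Claim_equal_normalize_symbol_name : Prop := ∀ (symbol : String) (available_symbols : List String), Dom_normalize_symbol_name symbol available_symbols → Spec_normalize_symbol_name symbol available_symbols (normalize_symbol_name symbol available_symbols)

-- ===== LEMMAS AND PROOFS =====

-- A's exact-match lookup: last s with upper s = t wins (dict overwrite).
def pvEStep (t : String) (a : Option String) (s : String) : Option String :=
  if PySem.Str.upper s == t then some s else a

-- B's prefix-minimum step, restricted to prefix matches.
def pvMin (a : Option String) (s : String) : Option String :=
  match a with
  | none => some s
  | some b => if pvKeyLt s b then some s else some b

def pvPStep (t : String) (a : Option String) (s : String) : Option String :=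
  if PySem.Str.startswith (PySem.Str.upper s) t then pvMin a s else a

theorem pvDictFold (t : String) (l : List String) (d : PySem.Dict String String) :
    (l.foldl (fun d s => d.insert (PySem.Str.upper s) s) d).get? t
      = l.foldl (pvEStep t) (d.get? t) := by
  induction l generalizing d with
  | nil => rfl
  | cons s l ih =>
    rw [List.foldl_cons, List.foldl_cons, ih]
    congr 1
    rw [PySem.Dict.get?_insert]
    by_cases h : PySem.Str.upper s = t
    · simp [pvEStep, h]
    · simp [pvEStep, h, Ne.symm h]

theorem pvPairFold (t : String) (l : List String) (e0 p0 : Option String) :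
    l.foldl
      (fun (acc : Option String × Option String) s =>
        (if PySem.Str.upper s == t then some s else acc.1,
         if PySem.Str.startswith (PySem.Str.upper s) t then
           (match acc.2 with
            | none => some s
            | some b => if pvKeyLt s b then some s else some b)
         else acc.2))
      (e0, p0)
      = (l.foldl (pvEStep t) e0, l.foldl (pvPStep t) p0) :=
  PySem.List.foldl_prod_mk (pvEStep t) (pvPStep t) l e0 p0

theorem pvPrefixFilter (t : String) (l : List String) (a : Option String) :
    l.foldl (pvPStep t) a
      = (l.filter (fun s => PySem.Str.startswith (PySem.Str.upper s) t)).foldl pvMin a := by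
  induction l generalizing a with
  | nil => rfl
  | cons s l ih =>
    simp only [List.foldl_cons, List.filter_cons, pvPStep, ih]
    split_ifs with h <;> simp [List.foldl_cons]

theorem pvHeadInsertBy (before : String → String → Bool) (x : String) (acc : List String) :
    (PySem.List.insertBy before x acc).head?
      = some (match acc.head? with
              | none => x
              | some h => if before x h then x else h) := by
  cases acc with
  | nil => rfl
  | cons y ys =>
    simp only [PySem.List.insertBy]
    split_ifs with hb <;> simp [hb]

def pvSortMin (before : String → String → Bool) (o : Option String) (x : String) : Option String :=
  some (match o with
        | none => x
        | some h => if before x h then x else h)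

theorem pvSortHead (before : String → String → Bool) (cs acc : List String) :
    (cs.foldl (fun acc x => PySem.List.insertBy before x acc) acc).head?
      = cs.foldl (pvSortMin before) acc.head? := by
  induction cs generalizing acc with
  | nil => rfl
  | cons x cs ih =>
    simp only [List.foldl_cons, ih, pvHeadInsertBy, pvSortMin]

theorem pvSortMinEq :
    pvSortMin (fun a b =>
        decide (PySem.Str.len a < PySem.Str.len b) ||
          (!decide (PySem.Str.len b < PySem.Str.len a) && decide (a < b))) = pvMin := by
  funext o x
  cases o with
  | none => rfl
  | some b =>
    simp only [pvSortMin, pvMin, pvKeyLt]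
    rcases lt_trichotomy x.length b.length with h | h | h
    · simp [PySem.Str.len, h]
    · simp [PySem.Str.len, h]
      split_ifs <;> rfl
    · simp [PySem.Str.len, Nat.lt_asymm h, not_le.mpr h, h.ne']

theorem pvSortedHead (cs : List String) :
    (PySem.List.sorted2 cs (fun s => PySem.Str.len s) (fun s => s)).head?
      = cs.foldl pvMin none := by
  have h : PySem.List.sorted2 cs (fun s => PySem.Str.len s) (fun s => s)
      = cs.foldl
          (fun acc x => PySem.List.insertBy
            (fun a b =>
              decide (PySem.Str.len a < PySem.Str.len b) ||
                (!decide (PySem.Str.len b < PySem.Str.len a) && decide (a < b))) x acc) [] := rfl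
  rw [h, pvSortHead, pvSortMinEq]
  rfl

theorem pvMainEq (symbol : String) (available_symbols : List String) :
    normalize_symbol_name symbol available_symbols
      = normalize_symbol_name_alt symbol available_symbols := by
  have hA : normalize_symbol_name symbol available_symbols
      = (match (available_symbols.foldl (fun d s => d.insert (PySem.Str.upper s) s)
            (PySem.Dict.empty : PySem.Dict String String)).get? (PySem.Str.upper symbol) with
         | some v => some v
         | none =>
           if available_symbols.filter
               (fun s => PySem.Str.startswith (PySem.Str.upper s) (PySem.Str.upper symbol)) = []
           then none
           else (PySem.List.sorted2
                  (available_symbols.filter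
                    (fun s => PySem.Str.startswith (PySem.Str.upper s) (PySem.Str.upper symbol)))
                  (fun s => PySem.Str.len s) (fun s => s)).head?) := rfl
  have hB : normalize_symbol_name_alt symbol available_symbols
      = (match (available_symbols.foldl
            (fun (acc : Option String × Option String) s =>
              (if PySem.Str.upper s == PySem.Str.upper symbol then some s else acc.1,
               if PySem.Str.startswith (PySem.Str.upper s) (PySem.Str.upper symbol) then
                 (match acc.2 with
                  | none => some s
                  | some b => if pvKeyLt s b then some s else some b)
               else acc.2))
            (none, none)).1 with
         | some v => some v
         | none =>
           (available_symbols.foldl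
            (fun (acc : Option String × Option String) s =>
              (if PySem.Str.upper s == PySem.Str.upper symbol then some s else acc.1,
               if PySem.Str.startswith (PySem.Str.upper s) (PySem.Str.upper symbol) then
                 (match acc.2 with
                  | none => some s
                  | some b => if pvKeyLt s b then some s else some b)
               else acc.2))
            (none, none)).2) := rfl
  rw [hA, hB, pvPairFold, pvDictFold, pvPrefixFilter, ← pvSortedHead]
  simp only [PySem.Dict.get?_empty]
  cases available_symbols.foldl (pvEStep (PySem.Str.upper symbol)) none with
  | some v => rfl
  | none =>
    cases hc : available_symbols.filter
        (fun s => PySem.Str.startswith (PySem.Str.upper s) (PySem.Str.upper symbol)) with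
    | nil => rfl
    | cons c cs => simp

-- ===== VERDICT (by name: the statement is the Claim_ definition above) =====
theorem normalize_symbol_name_spec : Claim_equal_normalize_symbol_name := by
  intro symbol available_symbols _
  unfold Spec_normalize_symbol_name
  exact pvMainEq symbol available_symbols
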